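-- pv_equiv track=rewrite | github.com/pyannote/pyannote-video | pyannote/video/structure/thread.py | product_lookahead
-- ===== SOURCE A (Python) =====
-- from collections import deque
-- from itertools import combinations
--
-- def product_lookahead(iterable, lookahead):
--
--     cache = deque([], lookahead + 1)
--
--     for item in iterable:
--
--         # fill cache with up to 'lookahead + 1' items
--         cache.append(item)
--         if len(cache) < lookahead + 1:
--             continue
--
--         # iterate over lookahead pairs (*)
--         for j in range(lookahead):
--             yield cache[0], cache[j+1]
--
--     # if cache is full, it means that the (*) part of the above loop
--     # was executed and we should therefore not yield (cache[0], ...) pairs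
--     # a second time -- and thus remove cache[0] first.
--
--     # reciprocally, if cache is not full, it means that the (*) part of the
--     # above loop was never executed and we should therefore yield all possible
--     # pairs, including (cach[0], ...) pairs -- and thus we do **not** remove
--     # cache[0]
--
--     if len(cache) == lookahead + 1:
--         cache.popleft()
--
--     # exhaust the cache with standard itertools combinations
--     for item1, item2 in combinations(cache, 2):
--         yield item1, item2
-- ===== SOURCE B (Python) =====
-- def product_lookahead(iterable, lookahead):
--     rest = list(iterable)
--     while rest:
--         head = rest.pop(0)
--         for other in rest[:lookahead]:
--             yield head, other
-- ===== Notes on version B (the rewrite author's own statement) =====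
-- stated objective: simpler
-- what changed: Replaces A's bounded-deque sliding window plus a separate final itertools.combinations pass with a single uniform recursion that pairs each head with the next 'lookahead' elements of the remaining list.
import Mathlib
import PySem

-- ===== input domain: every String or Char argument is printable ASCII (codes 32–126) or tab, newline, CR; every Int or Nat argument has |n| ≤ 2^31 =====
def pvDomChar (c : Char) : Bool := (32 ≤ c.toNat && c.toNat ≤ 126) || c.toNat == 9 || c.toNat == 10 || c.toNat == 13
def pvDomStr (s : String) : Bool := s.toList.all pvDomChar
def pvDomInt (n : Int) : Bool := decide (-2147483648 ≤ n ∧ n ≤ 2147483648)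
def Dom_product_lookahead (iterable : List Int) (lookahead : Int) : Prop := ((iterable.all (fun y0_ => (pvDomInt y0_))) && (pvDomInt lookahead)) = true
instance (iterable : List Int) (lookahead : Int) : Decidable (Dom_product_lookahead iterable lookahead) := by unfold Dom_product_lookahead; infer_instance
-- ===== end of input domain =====

-- B replaces A's bounded-deque sliding window plus final combinations pass with a single
-- head-and-lookahead recursion over the list (objective: simpler).

-- ===== PORT A =====
-- deque append with maxlen m: append right, drop from the left down to m items
def pvDequeAppend (cache : List Int) (m : Nat) (x : Int) : List Int :=
  if (cache ++ [x]).length > m then (cache ++ [x]).drop ((cache ++ [x]).length - m)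
  else cache ++ [x]

-- itertools.combinations(cache, 2), yielded in order
def pvCombos2 : List Int → List (Int × Int)
  | [] => []
  | x :: xs => xs.map (fun y => (x, y)) ++ pvCombos2 xs

-- the 'for item in iterable' loop, state = (cache, pairs yielded so far);
-- cache[0] / cache[j+1] are always in range when the yield runs (cache full, j < lookahead),
-- so pyGetD's default 0 is never used
def pvLoopA (lookahead : Int) : List Int → List Int → List (Int × Int) → List Int × List (Int × Int)
  | [], cache, out => (cache, out)
  | a :: rest, cache, out =>
    let cache := pvDequeAppend cache (lookahead + 1).toNat a
    if (cache.length : Int) < lookahead + 1 then pvLoopA lookahead rest cache out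
    else pvLoopA lookahead rest cache
      (out ++ (PySem.List.pyRange 0 lookahead 1).map
        (fun j => (PySem.List.pyGetD cache 0 0, PySem.List.pyGetD cache (j + 1) 0)))

def product_lookahead (iterable : List Int) (lookahead : Int) : List (Int × Int) :=
  let st := pvLoopA lookahead iterable [] []
  let cache := if (st.1.length : Int) == lookahead + 1 then st.1.drop 1 else st.1
  st.2 ++ pvCombos2 cache

-- ===== PORT B =====
-- while rest: head = rest.pop(0); yield (head, other) for other in rest[:lookahead]
def product_lookahead_alt (iterable : List Int) (lookahead : Int) : List (Int × Int) :=
  match iterable with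
  | [] => []
  | x :: rest => (PySem.List.slice rest none (some lookahead)).map (fun y => (x, y))
      ++ product_lookahead_alt rest lookahead

-- ===== PRECONDITION & SPEC =====
-- Python A raises for every lookahead < 0 (ValueError from deque(maxlen<0), or IndexError
-- from popleft when maxlen = 0), so exactly lookahead ≥ 0 is admitted.
def Pre_product_lookahead (iterable : List Int) (lookahead : Int) : Prop := 0 ≤ lookahead
instance (iterable : List Int) (lookahead : Int) : Decidable (Pre_product_lookahead iterable lookahead) := by unfold Pre_product_lookahead; infer_instance

def pvWitness_product_lookahead : List Int × Int := ([3, 1, 4, 1, 5], 2)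

def Spec_product_lookahead (iterable : List Int) (lookahead : Int) (out : List (Int × Int)) : Prop := out = product_lookahead_alt iterable lookahead
instance (iterable : List Int) (lookahead : Int) (out : List (Int × Int)) : Decidable (Spec_product_lookahead iterable lookahead out) := by unfold Spec_product_lookahead; infer_instance

-- ===== CLAIM (what is proved, stated in full; the proofs are below) =====
def Claim_equal_product_lookahead : Prop := ∀ (iterable : List Int) (lookahead : Int), Dom_product_lookahead iterable lookahead → Pre_product_lookahead iterable lookahead → Spec_product_lookahead iterable lookahead (product_lookahead iterable lookahead)

-- ===== LEMMAS AND PROOFS =====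

-- B with a nonnegative lookahead L is the canonical 'head with next L' recursion
theorem alt_cons (x : Int) (xs : List Int) (L : Int) (hL : 0 ≤ L) :
    product_lookahead_alt (x :: xs) L
      = (xs.take L.toNat).map (fun y => (x, y)) ++ product_lookahead_alt xs L := by
  simp [product_lookahead_alt, PySem.List.slice_to xs hL]

-- combinations of a short list (≤ L+1 items) are exactly B's pairs
theorem combos_eq_alt (L : Int) (hL : 0 ≤ L) :
    ∀ t : List Int, t.length ≤ L.toNat + 1 → pvCombos2 t = product_lookahead_alt t L := by
  intro t
  induction t with
  | nil => intro _; rfl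
  | cons x xs ih =>
    intro h
    rw [pvCombos2, alt_cons x xs L hL, List.take_of_length_le (by simp at h; omega),
      ih (by simp at h ⊢; omega)]

-- the pairs A yields from a full cache x :: xs (|xs| = L) are B's head pairs
theorem yield_pairs (L : Int) (x : Int) (xs : List Int)
    (hlen : xs.length = L.toNat) :
    (PySem.List.pyRange 0 L 1).map
        (fun j => (PySem.List.pyGetD (x :: xs) 0 0, PySem.List.pyGetD (x :: xs) (j + 1) 0))
      = xs.map (fun y => (x, y)) := by
  rw [PySem.List.pyRange_one 0 L]
  simp only [zero_add, List.map_map]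
  apply List.ext_getElem
  · simp [hlen]
  · intro i h1 h2
    simp only [List.getElem_map, List.getElem_range, Function.comp_apply]
    have : ((i : Int) + 1) = ((i + 1 : Nat) : Int) := by push_cast; ring
    rw [PySem.List.pyGetD_zero_cons, this, PySem.List.pyGetD_natCast]
    simp only [List.length_map] at h2
    simp [List.getD, List.getElem?_eq_getElem h2]

-- sliding phase: cache full (length L+1); afterwards the popleft branch fires
theorem loop_full (L : Int) (hL : 0 ≤ L) :
    ∀ (r w : List Int) (out : List (Int × Int)), w.length = L.toNat + 1 →
      (pvLoopA L r w out).1.length = L.toNat + 1 ∧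
      (pvLoopA L r w out).2 ++ pvCombos2 ((pvLoopA L r w out).1.drop 1)
        = out ++ product_lookahead_alt (w.drop 1 ++ r) L := by
  intro r
  induction r with
  | nil =>
    intro w out hw
    refine ⟨hw, ?_⟩
    simp only [pvLoopA, List.append_nil]
    rw [combos_eq_alt L hL (w.drop 1) (by simp [hw])]
  | cons a r ih =>
    intro w out hw
    have hdrop : pvDequeAppend w (L + 1).toNat a = w.drop 1 ++ [a] := by
      unfold pvDequeAppend
      have h1 : (w ++ [a]).length = L.toNat + 2 := by simp [hw]
      have hm : (L + 1).toNat = L.toNat + 1 := by omega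
      rw [h1, hm, if_pos (by omega)]
      simp [List.drop_append_of_le_length (by omega : 1 ≤ w.length)]
    have hlen' : (w.drop 1 ++ [a]).length = L.toNat + 1 := by simp [hw]
    simp only [pvLoopA, hdrop]
    rw [if_neg (by push_cast [hlen']; omega)]
    obtain ⟨h1, h2⟩ := ih (w.drop 1 ++ [a]) _ hlen'
    refine ⟨h1, ?_⟩
    rw [h2]
    -- w.drop 1 is nonempty iff L > 0; split on L = 0
    rcases Nat.eq_zero_or_pos L.toNat with h0 | hpos
    · -- L = 0: no pairs yielded, and alt drops heads freely
      have hL0 : L = 0 := by omega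
      subst hL0
      have : w.drop 1 = [] := List.drop_eq_nil_of_le (by omega)
      simp [this, alt_cons a r (0 : Int) le_rfl]
    · -- L ≥ 1: w.drop 1 = x :: xs with |xs| = L - 1
      obtain ⟨x, xs, hx⟩ : ∃ x xs, w.drop 1 = x :: xs := by
        cases hxs : w.drop 1 with
        | nil => exfalso; have := hlen'; rw [hxs] at this; simp at this; omega
        | cons x xs => exact ⟨x, xs, rfl⟩
      have hxs_len : xs.length = L.toNat - 1 := by
        have := hlen'; rw [hx] at this; simp at this; omega
      rw [hx]
      simp only [List.cons_append, List.drop_succ_cons, List.drop_zero]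
      rw [yield_pairs L x (xs ++ [a]) (by simp [hxs_len]; omega)]
      rw [alt_cons x (xs ++ a :: r) L hL]
      have htake : (xs ++ a :: r).take L.toNat = xs ++ [a] := by
        rw [List.take_append, List.take_of_length_le (by omega),
          hxs_len]
        have : L.toNat - (L.toNat - 1) = 1 := by omega
        simp [this]
      rw [htake, List.append_assoc]
      simp

-- filling phase: cache shorter than L+1
theorem loop_fill (L : Int) (hL : 0 ≤ L) :
    ∀ (r c : List Int) (out : List (Int × Int)), c.length < L.toNat + 1 →
      (let st := pvLoopA L r c out
       st.2 ++ pvCombos2 (if (st.1.length : Int) == L + 1 then st.1.drop 1 else st.1))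
        = out ++ product_lookahead_alt (c ++ r) L := by
  intro r
  induction r with
  | nil =>
    intro c out hc
    simp only [pvLoopA]
    rw [if_neg (by simp; omega), List.append_nil,
      combos_eq_alt L hL c (by omega)]
  | cons a r ih =>
    intro c out hc
    have happ : pvDequeAppend c (L + 1).toNat a = c ++ [a] := by
      unfold pvDequeAppend
      have hm : (L + 1).toNat = L.toNat + 1 := by omega
      rw [if_neg (by simp [hm]; omega)]
    simp only [pvLoopA, happ]
    by_cases hfull : c.length + 1 = L.toNat + 1
    · -- cache just became full: yields pairs then enters sliding phase
      rw [if_neg (by simp; omega)]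
      obtain ⟨x, xs, hx⟩ : ∃ x xs, c ++ [a] = x :: xs := by
        cases c with
        | nil => exact ⟨a, [], rfl⟩
        | cons y ys => exact ⟨y, ys ++ [a], rfl⟩
      have hxs_len : xs.length = L.toNat := by
        have : (c ++ [a]).length = L.toNat + 1 := by simp; omega
        rw [hx] at this; simp at this; omega
      obtain ⟨h1, h2⟩ := loop_full L hL r (c ++ [a])
        (out ++ (PySem.List.pyRange 0 L 1).map
          (fun j => (PySem.List.pyGetD (c ++ [a]) 0 0, PySem.List.pyGetD (c ++ [a]) (j + 1) 0)))
        (by simp; omega)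
      rw [if_pos (by simp [h1]; omega)]
      rw [h2, hx]
      simp only [List.drop_succ_cons, List.drop_zero]
      rw [yield_pairs L x xs hxs_len]
      have hca : c ++ a :: r = x :: (xs ++ r) := by
        have : c ++ a :: r = (c ++ [a]) ++ r := by simp
        rw [this, hx]; simp
      rw [hca, alt_cons x (xs ++ r) L hL,
        List.take_append, List.take_of_length_le (by omega), hxs_len,
        Nat.sub_self]
      simp
    · -- still filling
      rw [if_pos (by simp; omega)]
      have := ih (c ++ [a]) out (by simp; omega)
      simp only at this
      rw [this]
      simp

-- ===== VERDICT (by name: the statement is the Claim_ definition above) =====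
theorem product_lookahead_spec : Claim_equal_product_lookahead := by
  intro iterable lookahead _ hpre
  unfold Spec_product_lookahead product_lookahead
  have := loop_fill lookahead hpre iterable [] [] (by simp)
  simp only at this ⊢
  rw [this]
  simp
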